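-- pv_equiv track=rewrite | github.com/Adrien-hue/palaj | backend/app/services/solver/rh_combos.py | shift_involves_night
-- ===== SOURCE A (Python) =====
-- NIGHT_WINDOWS_DAY: tuple[tuple[int, int], ...] = ((21 * 60 + 30, 24 * 60), (0, 6 * 60 + 30))
--
-- def interval_intersects(a_start: int, a_end: int, b_start: int, b_end: int) -> bool:
--     return a_start < b_end and b_start < a_end
--
-- def shift_involves_night(start_min: int, end_min: int) -> bool:
--     """Return True if a [start,end) shift overlaps any night window on day axis.
--
--     end_min may be > 1440 for shifts crossing midnight.
--     """
--     if end_min <= 24 * 60: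
--         return any(interval_intersects(start_min, end_min, n_start, n_end) for n_start, n_end in NIGHT_WINDOWS_DAY)
--
--     segment1_start, segment1_end = start_min, 24 * 60
--     segment2_start, segment2_end = 0, end_min - 24 * 60
--     return interval_intersects(segment1_start, segment1_end, NIGHT_WINDOWS_DAY[0][0], NIGHT_WINDOWS_DAY[0][1]) or interval_intersects(
--         segment2_start,
--         segment2_end,
--         NIGHT_WINDOWS_DAY[1][0],
--         NIGHT_WINDOWS_DAY[1][1],
--     )
-- ===== SOURCE B (Python) =====
-- NIGHT_WINDOWS = ((1290, 1440), (0, 390))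
--
-- def shift_involves_night(start_min: int, end_min: int) -> bool:
--     # A shift crossing midnight (end_min > 1440) resumes at 00:00, which is
--     # inside the morning night window, so it always involves night.
--     if end_min > 1440:
--         return True
--     # Otherwise count the clamped night minutes the shift actually covers.
--     night_minutes = sum(
--         max(0, min(end_min, w_end) - max(start_min, w_start))
--         for w_start, w_end in NIGHT_WINDOWS
--     )
--     return night_minutes > 0
-- ===== Notes on version B (the rewrite author's own statement) =====
-- stated objective: alternative
-- what changed: B replaces A's boolean interval-intersection predicate over the window tuple and the midnight segment-splitting arithmetic with a clamped overlap-length computation: it sums the night minutes the shift actually covers and tests whether that total is positive (and returns True directly for end_min > 1440, since the post-midnight part starts at 00:00 inside the morning window).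
-- intended difference: On empty shifts (end_min <= start_min with end_min <= 1440) whose endpoints still straddle a night window, A returns True although the shift covers no minutes; B returns False, the intended value for an empty interval. — e.g. on shift_involves_night(1350, 1300): A returns true, B returns false
import Mathlib
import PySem

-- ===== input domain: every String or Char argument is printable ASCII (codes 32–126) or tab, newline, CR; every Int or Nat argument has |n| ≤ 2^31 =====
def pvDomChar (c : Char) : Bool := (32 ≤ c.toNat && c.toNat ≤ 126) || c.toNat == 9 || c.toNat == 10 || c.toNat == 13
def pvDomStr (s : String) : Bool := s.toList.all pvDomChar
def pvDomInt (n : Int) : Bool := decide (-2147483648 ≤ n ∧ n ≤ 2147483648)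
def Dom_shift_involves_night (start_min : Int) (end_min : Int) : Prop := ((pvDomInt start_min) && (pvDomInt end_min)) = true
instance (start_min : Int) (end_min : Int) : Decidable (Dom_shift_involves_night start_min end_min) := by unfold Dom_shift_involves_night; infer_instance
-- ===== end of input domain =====

-- B computes the clamped night-minute overlap total instead of A's boolean interval
-- intersections; intended difference: on empty shifts (end ≤ start ≤ 1440 region)
-- straddling a night window A returns True, B returns False (an empty shift covers no minutes).


-- ===== PORT A =====
def NIGHT_WINDOWS_DAY : List (Int × Int) := [(21 * 60 + 30, 24 * 60), (0, 6 * 60 + 30)]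

def interval_intersects (a_start a_end b_start b_end : Int) : Bool :=
  a_start < b_end && b_start < a_end

def shift_involves_night (start_min : Int) (end_min : Int) : Bool :=
  if end_min ≤ 24 * 60 then
    NIGHT_WINDOWS_DAY.any (fun nw => interval_intersects start_min end_min nw.1 nw.2)
  else
    let segment1_start := start_min
    let segment1_end : Int := 24 * 60
    let segment2_start : Int := 0
    let segment2_end := end_min - 24 * 60
    interval_intersects segment1_start segment1_end
        (NIGHT_WINDOWS_DAY[0]!).1 (NIGHT_WINDOWS_DAY[0]!).2
      || interval_intersects segment2_start segment2_end
        (NIGHT_WINDOWS_DAY[1]!).1 (NIGHT_WINDOWS_DAY[1]!).2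

-- ===== PORT B =====
def NIGHT_WINDOWS : List (Int × Int) := [(1290, 1440), (0, 390)]

def shift_involves_night_alt (start_min : Int) (end_min : Int) : Bool :=
  if end_min > 1440 then
    true
  else
    let night_minutes :=
      NIGHT_WINDOWS.foldl
        (fun acc w => acc + max 0 (min end_min w.2 - max start_min w.1)) 0
    night_minutes > 0

-- ===== PRECONDITION & SPEC =====
-- On empty shifts (end_min ≤ start_min with end_min ≤ 1440) whose endpoints still straddle a
-- night window, A returns True although the shift covers no minutes; B returns False, the
-- intended value for an empty interval.
def D_shift_involves_night (start_min : Int) (end_min : Int) : Prop :=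
  end_min ≤ 1440 ∧ end_min ≤ start_min ∧
    ((start_min < 1440 ∧ 1290 < end_min) ∨ (start_min < 390 ∧ 0 < end_min))
instance (start_min : Int) (end_min : Int) : Decidable (D_shift_involves_night start_min end_min) := by unfold D_shift_involves_night; infer_instance

def Spec_shift_involves_night (start_min : Int) (end_min : Int) (out : Bool) : Prop := ¬ D_shift_involves_night start_min end_min → out = shift_involves_night_alt start_min end_min
instance (start_min : Int) (end_min : Int) (out : Bool) : Decidable (Spec_shift_involves_night start_min end_min out) := by unfold Spec_shift_involves_night; infer_instance

def pvDiffWitness_shift_involves_night : Int × Int := (1350, 1300)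
def pvDiffWitnessOut_shift_involves_night : Bool × Bool := (true, false)

-- ===== CLAIM (what is proved, stated in full; the proofs are below) =====
def Claim_unchanged_shift_involves_night : Prop := ∀ (start_min : Int) (end_min : Int), Dom_shift_involves_night start_min end_min → Spec_shift_involves_night start_min end_min (shift_involves_night start_min end_min)
def Claim_changed_shift_involves_night : Prop := Dom_shift_involves_night (pvDiffWitness_shift_involves_night.1) (pvDiffWitness_shift_involves_night.2) ∧ D_shift_involves_night (pvDiffWitness_shift_involves_night.1) (pvDiffWitness_shift_involves_night.2) ∧ shift_involves_night (pvDiffWitness_shift_involves_night.1) (pvDiffWitness_shift_involves_night.2) = pvDiffWitnessOut_shift_involves_night.1 ∧ shift_involves_night_alt (pvDiffWitness_shift_involves_night.1) (pvDiffWitness_shift_involves_night.2) = pvDiffWitnessOut_shift_involves_night.2 ∧ pvDiffWitnessOut_shift_involves_night.1 ≠ pvDiffWitnessOut_shift_involves_night.2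
def Claim_exact_shift_involves_night : Prop := ∀ (start_min : Int) (end_min : Int), Dom_shift_involves_night start_min end_min → D_shift_involves_night start_min end_min → shift_involves_night start_min end_min ≠ shift_involves_night_alt start_min end_min

-- ===== LEMMAS AND PROOFS =====

-- ===== VERDICT (by name: the statements are the Claim_ definitions above) =====
theorem shift_involves_night_spec : Claim_unchanged_shift_involves_night := by
  intro s e _ hD
  unfold D_shift_involves_night at hD
  unfold shift_involves_night shift_involves_night_alt NIGHT_WINDOWS_DAY NIGHT_WINDOWS
    interval_intersects
  simp only [List.any, List.foldl, Bool.or_false]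
  rw [Bool.eq_iff_iff]
  split_ifs with h1 h2 <;> simp <;> omega

theorem shift_involves_night_changed : Claim_changed_shift_involves_night := by
  unfold Claim_changed_shift_involves_night; decide

theorem shift_involves_night_tight : Claim_exact_shift_involves_night := by
  intro s e _ hD
  unfold D_shift_involves_night at hD
  unfold shift_involves_night shift_involves_night_alt NIGHT_WINDOWS_DAY NIGHT_WINDOWS
    interval_intersects
  simp only [List.any, List.foldl, Bool.or_false]
  intro h
  rw [Bool.eq_iff_iff] at h
  split_ifs at h with h1 h2 <;> simp at h <;> omega
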